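-- pv_equiv track=rewrite | github.com/cwb14/synLTR | module2/mask_ltr.py | build_keep_flanks_truncated
-- ===== SOURCE A (Python) =====
-- from typing import Dict, List, Tuple, Iterator, Optional
--
-- def merge_intervals(intervals: List[Tuple[int, int]]) -> List[Tuple[int, int]]:
--     """Merge overlapping/adjacent half-open intervals."""
--     if not intervals:
--         return []
--     intervals.sort()
--     merged = [intervals[0]]
--     for s, e in intervals[1:]:
--         ps, pe = merged[-1]
--         if s <= pe:  # overlap/adjacent
--             merged[-1] = (ps, max(pe, e))
--         else:
--             merged.append((s, e))
--     return merged
--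
-- def build_keep_flanks_truncated(
--     feats_merged: List[Tuple[int, int]],
--     blockers_merged: List[Tuple[int, int]],
--     n: int,
--     dist: int
-- ) -> List[Tuple[int, int]]:
--     """
--     Build keep-intervals = left/right flanks around EACH PRIMARY feature, truncated so they
--     never enter ANY blocker interval.
--
--     - feats_merged: merged PRIMARY features (the ones that are masked)
--     - blockers_merged: merged PRIMARY + EXTRA features (only used to stop flanks early)
--
--     For each primary feature [s,e):
--       left flank:  [max(prev_blocker_end, s - dist), s)
--       right flank: [e, min(next_blocker_start, e + dist))
--     """
--     if dist <= 0 or not feats_merged: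
--         return []
--     if not blockers_merged:
--         blockers_merged = feats_merged
--
--     keep: List[Tuple[int, int]] = []
--
--     # Pointer into blockers to locate where each primary feature falls
--     b = 0
--     for (s, e) in feats_merged:
--         # advance until blocker end > s
--         while b < len(blockers_merged) and blockers_merged[b][1] <= s:
--             b += 1
--
--         # Determine which blocker contains s (it should, because primary is included in blockers)
--         if b < len(blockers_merged) and blockers_merged[b][0] <= s < blockers_merged[b][1]:
--             idx = b
--         else:
--             # Fallback (should be rare): treat as its own blocker context
--             idx = b
--
--         prev_end = blockers_merged[idx - 1][1] if idx > 0 else 0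
--         next_start = blockers_merged[idx + 1][0] if idx + 1 < len(blockers_merged) else n
--
--         # left flank (stop at prev blocker)
--         ls = max(0, s - dist, prev_end)
--         le = s
--         if le > ls:
--             keep.append((ls, le))
--
--         # right flank (stop at next blocker)
--         rs = e
--         re = min(n, e + dist, next_start)
--         if re > rs:
--             keep.append((rs, re))
--
--     return merge_intervals(keep)
-- ===== SOURCE B (Python) =====
-- def _first_gt(ends, s, lo, hi):
--     # recursive binary search: first index with ends[index] > s (hi if none)
--     if lo >= hi:
--         return lo
--     mid = (lo + hi) // 2
--     if ends[mid] <= s: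
--         return _first_gt(ends, s, mid + 1, hi)
--     return _first_gt(ends, s, lo, mid)
--
-- def _merge_sorted(ivs):
--     # merge a pre-sorted interval list by absorbing the overlapping/adjacent run of each group
--     out = []
--     i, k = 0, len(ivs)
--     while i < k:
--         s, e = ivs[i]
--         i += 1
--         while i < k and ivs[i][0] <= e:
--             e = max(e, ivs[i][1])
--             i += 1
--         out.append((s, e))
--     return out
--
-- def build_keep_flanks_truncated(feats_merged, blockers_merged, n, dist):
--     if dist <= 0 or not feats_merged:
--         return []
--     blockers = blockers_merged if blockers_merged else feats_merged
--     starts = [p[0] for p in blockers]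
--     ends = [p[1] for p in blockers]
--     m = len(blockers)
--
--     def flanks(s, e):
--         i = _first_gt(ends, s, 0, m)
--         lo = ends[i - 1] if i > 0 else 0
--         hi = starts[i + 1] if i + 1 < m else n
--         out = []
--         ls = max(0, s - dist, lo)
--         if ls < s:
--             out.append((ls, s))
--         re = min(n, e + dist, hi)
--         if e < re:
--             out.append((e, re))
--         return out
--
--     keep = [iv for s, e in feats_merged for iv in flanks(s, e)]
--     return _merge_sorted(sorted(keep))
-- ===== Notes on version B (the rewrite author's own statement) =====
-- stated objective: alternative
-- what changed: Replaces A's stateful monotone two-pointer scan over blockers with a stateless per-feature recursive binary search over a projected blocker-ends list, and A's fold-style merge_intervals with a group-absorbing two-level merge pass over the sorted flank list.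
-- outside the precondition, e.g. on build_keep_flanks_truncated([(8, 4), (6, 6)], [(7, 8)], 2, 5): A returns [], B returns [(1, 6)]
import Mathlib
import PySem

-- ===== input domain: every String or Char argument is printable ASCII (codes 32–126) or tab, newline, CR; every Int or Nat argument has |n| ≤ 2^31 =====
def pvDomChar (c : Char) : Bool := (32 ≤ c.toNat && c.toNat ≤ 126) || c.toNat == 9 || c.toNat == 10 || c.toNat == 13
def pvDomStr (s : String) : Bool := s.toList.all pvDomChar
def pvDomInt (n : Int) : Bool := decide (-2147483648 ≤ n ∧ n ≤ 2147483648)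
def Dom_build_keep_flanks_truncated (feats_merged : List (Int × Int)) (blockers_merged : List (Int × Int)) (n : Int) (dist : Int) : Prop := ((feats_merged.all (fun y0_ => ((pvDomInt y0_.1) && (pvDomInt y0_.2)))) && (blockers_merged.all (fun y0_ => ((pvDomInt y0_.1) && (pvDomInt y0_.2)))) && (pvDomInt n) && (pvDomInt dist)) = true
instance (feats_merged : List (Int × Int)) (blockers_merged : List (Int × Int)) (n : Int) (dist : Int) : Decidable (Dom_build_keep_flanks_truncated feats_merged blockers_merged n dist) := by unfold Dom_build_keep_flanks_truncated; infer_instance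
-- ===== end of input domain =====

-- B replaces A's stateful monotone two-pointer blocker scan and fold-style merge by a stateless
-- per-feature recursive binary search over a projected blocker-ends list plus a group-absorbing
-- merge pass (alternative algorithm, similar cost); equivalence on merged (sorted) input lists.


-- ===== PORT A =====
-- A's module helper merge_intervals: `merged` carried as (init, last); Python's merged[-1] is
-- `last`, merged.append grows `init`, the final result is init ++ [last].
def pvMergeFold (acc : List (Int × Int) × (Int × Int)) (se : Int × Int) : List (Int × Int) × (Int × Int) :=
  if se.1 ≤ acc.2.2 then (acc.1, (acc.2.1, max acc.2.2 se.2))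
  else (acc.1 ++ [acc.2], se)

def merge_intervals (intervals : List (Int × Int)) : List (Int × Int) :=
  match PySem.List.sorted2 intervals Prod.fst Prod.snd with  -- intervals.sort(): lexicographic
  | [] => []
  | x :: rest =>
    let r := rest.foldl pvMergeFold ([], x)
    r.1 ++ [r.2]

-- A's inner `while b < len(blockers_merged) and blockers_merged[b][1] <= s: b += 1`
-- (structural recursion on a fuel bound: from any b the while advances at most bl.length times)
def pvAdvance (bl : List (Int × Int)) (s : Int) : Nat → Nat → Nat
  | 0, b => b
  | f + 1, b => if b < bl.length ∧ (bl.getD b (0, 0)).2 ≤ s then pvAdvance bl s f (b + 1) else b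

-- A's loop body over `(s, e) in feats_merged`, state = (keep, b)
def pvAStep (bl : List (Int × Int)) (n dist : Int) (acc : List (Int × Int) × Nat) (fe : Int × Int) : List (Int × Int) × Nat :=
  let b := pvAdvance bl fe.1 bl.length acc.2
  -- Python's if/else both set idx = b; kept as in the source
  let idx := if b < bl.length ∧ (bl.getD b (0, 0)).1 ≤ fe.1 ∧ fe.1 < (bl.getD b (0, 0)).2 then b else b
  let prev_end := if 0 < idx then (bl.getD (idx - 1) (0, 0)).2 else 0
  let next_start := if idx + 1 < bl.length then (bl.getD (idx + 1) (0, 0)).1 else n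
  let ls := max (max 0 (fe.1 - dist)) prev_end
  let keep1 := if ls < fe.1 then acc.1 ++ [(ls, fe.1)] else acc.1
  let re := min (min n (fe.2 + dist)) next_start
  let keep2 := if fe.2 < re then keep1 ++ [(fe.2, re)] else keep1
  (keep2, b)

def build_keep_flanks_truncated (feats_merged : List (Int × Int)) (blockers_merged : List (Int × Int)) (n : Int) (dist : Int) : List (Int × Int) :=
  if dist ≤ 0 ∨ feats_merged = [] then []
  else
    let bl := if blockers_merged = [] then feats_merged else blockers_merged
    merge_intervals (feats_merged.foldl (pvAStep bl n dist) ([], 0)).1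

-- ===== PORT B =====
-- Source B's recursive binary search _first_gt over the projected ends list
-- (structural recursion on a fuel bound: hi - lo shrinks every call, so fuel hi - lo suffices)
def pvFirstGt (ends : List Int) (s : Int) : Nat → Nat → Nat → Nat
  | 0, lo, _ => lo
  | f + 1, lo, hi =>
    if lo ≥ hi then lo
    else
      let mid := (lo + hi) / 2
      if ends.getD mid 0 ≤ s then pvFirstGt ends s f (mid + 1) hi else pvFirstGt ends s f lo mid

-- Source B's _merge_sorted inner absorbing `while`: swallow the run overlapping/adjacent to end e
def pvAbsorb (e : Int) : List (Int × Int) → Int × List (Int × Int)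
  | [] => (e, [])
  | p :: t => if p.1 ≤ e then pvAbsorb (max e p.2) t else (e, p :: t)

-- Source B's _merge_sorted outer loop: one output interval per group
-- (structural recursion on a fuel bound: each group consumes at least one element)
def pvMergeSorted : Nat → List (Int × Int) → List (Int × Int)
  | 0, _ => []
  | _ + 1, [] => []
  | f + 1, se :: t =>
    (se.1, (pvAbsorb se.2 t).1) :: pvMergeSorted f (pvAbsorb se.2 t).2

-- Source B's per-feature `flanks(s, e)` over the projected starts/ends lists
def pvFlanks (starts ends : List Int) (m : Nat) (n dist : Int) (se : Int × Int) : List (Int × Int) :=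
  let i := pvFirstGt ends se.1 m 0 m
  let lo := if 0 < i then ends.getD (i - 1) 0 else 0
  let hi := if i + 1 < m then starts.getD (i + 1) 0 else n
  let ls := max (max 0 (se.1 - dist)) lo
  let re := min (min n (se.2 + dist)) hi
  (if ls < se.1 then [(ls, se.1)] else []) ++ (if se.2 < re then [(se.2, re)] else [])

def build_keep_flanks_truncated_alt (feats_merged : List (Int × Int)) (blockers_merged : List (Int × Int)) (n : Int) (dist : Int) : List (Int × Int) :=
  if dist ≤ 0 ∨ feats_merged = [] then []
  else
    let bl := if blockers_merged = [] then feats_merged else blockers_merged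
    let starts := bl.map Prod.fst
    let ends := bl.map Prod.snd
    let keep := feats_merged.flatMap (pvFlanks starts ends bl.length n dist)
    pvMergeSorted (PySem.List.sorted2 keep Prod.fst Prod.snd).length
      (PySem.List.sorted2 keep Prod.fst Prod.snd)

-- ===== PRECONDITION & SPEC =====
-- starts (resp. ends) nondecreasing along the list
def pvStartsMono : List (Int × Int) → Bool
  | [] => true
  | [_] => true
  | p :: q :: rest => decide (p.1 ≤ q.1) && pvStartsMono (q :: rest)

def pvEndsMono : List (Int × Int) → Bool
  | [] => true
  | [_] => true
  | p :: q :: rest => decide (p.2 ≤ q.2) && pvEndsMono (q :: rest)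

-- Pre_ restricts to the sortedness the function's documented natural domain ("merged" interval
-- lists) guarantees and that A's monotone pointer presupposes: feature starts nondecreasing and
-- effective blocker ends nondecreasing (trivially satisfied when the dist/empty guard returns []);
-- on out-of-order inputs A's pointer, left advanced by an earlier feature, can skip blockers that
-- B's fresh binary search finds.
def Pre_build_keep_flanks_truncated (feats_merged : List (Int × Int)) (blockers_merged : List (Int × Int)) (n : Int) (dist : Int) : Prop :=
  (dist ≤ 0 ∨ feats_merged = []) ∨
    (pvStartsMono feats_merged = true ∧
      pvEndsMono (if blockers_merged = [] then feats_merged else blockers_merged) = true)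
instance (feats_merged : List (Int × Int)) (blockers_merged : List (Int × Int)) (n : Int) (dist : Int) : Decidable (Pre_build_keep_flanks_truncated feats_merged blockers_merged n dist) := by unfold Pre_build_keep_flanks_truncated; infer_instance

def pvWitness_build_keep_flanks_truncated : (List (Int × Int)) × (List (Int × Int)) × Int × Int :=
  ([(2, 5), (20, 26)], [(0, 6), (10, 12), (20, 30)], 40, 5)

def Spec_build_keep_flanks_truncated (feats_merged : List (Int × Int)) (blockers_merged : List (Int × Int)) (n : Int) (dist : Int) (out : List (Int × Int)) : Prop := out = build_keep_flanks_truncated_alt feats_merged blockers_merged n dist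
instance (feats_merged : List (Int × Int)) (blockers_merged : List (Int × Int)) (n : Int) (dist : Int) (out : List (Int × Int)) : Decidable (Spec_build_keep_flanks_truncated feats_merged blockers_merged n dist out) := by unfold Spec_build_keep_flanks_truncated; infer_instance

-- ===== CLAIM (what is proved, stated in full; the proofs are below) =====
def Claim_equal_build_keep_flanks_truncated : Prop := ∀ (feats_merged : List (Int × Int)) (blockers_merged : List (Int × Int)) (n : Int) (dist : Int), Dom_build_keep_flanks_truncated feats_merged blockers_merged n dist → Pre_build_keep_flanks_truncated feats_merged blockers_merged n dist → Spec_build_keep_flanks_truncated feats_merged blockers_merged n dist (build_keep_flanks_truncated feats_merged blockers_merged n dist)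

-- ===== LEMMAS AND PROOFS =====

-- first index whose blocker end exceeds s (bl.length if none): the value both searches compute
def pvFi (bl : List (Int × Int)) (s : Int) : Nat :=
  match bl with
  | [] => 0
  | p :: t => if p.2 ≤ s then pvFi t s + 1 else 0

lemma pvFi_le_length (bl : List (Int × Int)) (s : Int) : pvFi bl s ≤ bl.length := by
  induction bl with
  | nil => simp [pvFi]
  | cons p t ih =>
    by_cases hp : p.2 ≤ s <;> simp [pvFi, hp] <;> omega

lemma pvFi_lt (bl : List (Int × Int)) (s : Int) (i : Nat) (h : i < pvFi bl s) :
    (bl.getD i (0, 0)).2 ≤ s := by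
  induction bl generalizing i with
  | nil => simp [pvFi] at h
  | cons p t ih =>
    simp only [pvFi] at h
    split at h
    · cases i with
      | zero => simpa
      | succ j => simpa using ih j (by omega)
    · omega

lemma pvFi_stop (bl : List (Int × Int)) (s : Int) (h : pvFi bl s < bl.length) :
    s < (bl.getD (pvFi bl s) (0, 0)).2 := by
  induction bl with
  | nil => simp at h
  | cons p t ih =>
    by_cases hp : p.2 ≤ s
    · simp only [pvFi, if_pos hp, List.length_cons] at h
      simp only [pvFi, if_pos hp, List.getD_cons_succ]
      exact ih (by omega)
    · simp only [pvFi, if_neg hp, List.getD_cons_zero]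
      omega

lemma pvAdvance_eq (bl : List (Int × Int)) (s : Int) (f b : Nat) (h : b ≤ pvFi bl s)
    (hf : pvFi bl s ≤ b + f) : pvAdvance bl s f b = pvFi bl s := by
  induction f generalizing b with
  | zero => simp only [pvAdvance]; omega
  | succ f ih =>
    rw [pvAdvance]
    rcases Nat.lt_or_ge b (pvFi bl s) with hlt | hge
    · have hblen : b < bl.length := lt_of_lt_of_le hlt (pvFi_le_length bl s)
      rw [if_pos ⟨hblen, pvFi_lt bl s b hlt⟩]
      exact ih (b + 1) hlt (by omega)
    · have hb : b = pvFi bl s := le_antisymm h hge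
      subst hb
      rw [if_neg]
      rintro ⟨h1, h2⟩
      have := pvFi_stop bl s h1
      omega

lemma pvStartsMono_cons (p : Int × Int) (t : List (Int × Int)) (h : pvStartsMono (p :: t) = true) :
    pvStartsMono t = true ∧ ∀ q r, t = q :: r → p.1 ≤ q.1 := by
  cases t with
  | nil => simp [pvStartsMono]
  | cons q r =>
    simp only [pvStartsMono, Bool.and_eq_true, decide_eq_true_eq] at h
    exact ⟨h.2, by rintro q' r' ⟨rfl, rfl⟩; exact h.1⟩

lemma pvEndsMono_cons (p : Int × Int) (t : List (Int × Int)) (h : pvEndsMono (p :: t) = true) :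
    pvEndsMono t = true ∧ ∀ q r, t = q :: r → p.2 ≤ q.2 := by
  cases t with
  | nil => simp [pvEndsMono]
  | cons q r =>
    simp only [pvEndsMono, Bool.and_eq_true, decide_eq_true_eq] at h
    exact ⟨h.2, by rintro q' r' ⟨rfl, rfl⟩; exact h.1⟩

lemma pvEndsMono_ends (bl : List (Int × Int)) (h : pvEndsMono bl = true) :
    ∀ i j, i ≤ j → j < bl.length → (bl.getD i (0, 0)).2 ≤ (bl.getD j (0, 0)).2 := by
  induction bl with
  | nil => intro i j _ hj; simp at hj
  | cons p t ih =>
    obtain ⟨ht, hsep⟩ := pvEndsMono_cons p t h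
    intro i j hij hj
    cases i with
    | zero =>
      cases j with
      | zero => simp
      | succ j' =>
        simp only [List.getD_cons_zero, List.getD_cons_succ]
        cases t with
        | nil => simp at hj
        | cons q r =>
          have hpq : p.2 ≤ q.2 := hsep q r rfl
          have h0 : p.2 ≤ (List.getD (q :: r) 0 (0, 0)).2 := by
            simp only [List.getD_cons_zero]; omega
          have := ih ht 0 j' (by omega) (by simpa using hj)
          omega
    | succ i' =>
      cases j with
      | zero => omega
      | succ j' =>
        simp only [List.getD_cons_succ]
        exact ih ht i' j' (by omega) (by simpa using hj)

lemma getD_map_snd (bl : List (Int × Int)) (i : Nat) :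
    (bl.map Prod.snd).getD i 0 = (bl.getD i (0, 0)).2 := by
  induction bl generalizing i with
  | nil => simp
  | cons p t ih =>
    cases i with
    | zero => simp
    | succ j => simp only [List.map_cons, List.getD_cons_succ]; exact ih j

lemma getD_map_fst (bl : List (Int × Int)) (i : Nat) :
    (bl.map Prod.fst).getD i 0 = (bl.getD i (0, 0)).1 := by
  induction bl generalizing i with
  | nil => simp
  | cons p t ih =>
    cases i with
    | zero => simp
    | succ j => simp only [List.map_cons, List.getD_cons_succ]; exact ih j

lemma pvFirstGt_eq (bl : List (Int × Int)) (s : Int)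
    (hs : ∀ i j, i ≤ j → j < bl.length → (bl.getD i (0, 0)).2 ≤ (bl.getD j (0, 0)).2)
    (f lo hi : Nat) (h1 : lo ≤ pvFi bl s) (h2 : pvFi bl s ≤ hi) (h3 : hi ≤ bl.length)
    (hf : hi - lo ≤ f) : pvFirstGt (bl.map Prod.snd) s f lo hi = pvFi bl s := by
  induction f generalizing lo hi with
  | zero => simp only [pvFirstGt]; omega
  | succ f ih =>
    rw [pvFirstGt]
    by_cases hlh : lo ≥ hi
    · rw [if_pos hlh]; omega
    · rw [if_neg hlh]
      by_cases hm : (bl.map Prod.snd).getD ((lo + hi) / 2) 0 ≤ s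
      · rw [if_pos hm]
        rw [getD_map_snd] at hm
        have hmidfi : (lo + hi) / 2 < pvFi bl s := by
          rcases Nat.lt_or_ge ((lo + hi) / 2) (pvFi bl s) with hlt | hge
          · exact hlt
          · exfalso
            have hmlen : (lo + hi) / 2 < bl.length := by omega
            have hfl : pvFi bl s < bl.length := lt_of_le_of_lt hge hmlen
            have hst := pvFi_stop bl s hfl
            have := hs (pvFi bl s) ((lo + hi) / 2) hge hmlen
            omega
        exact ih ((lo + hi) / 2 + 1) hi hmidfi h2 h3 (by omega)
      · rw [if_neg hm]
        rw [getD_map_snd] at hm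
        have hle : pvFi bl s ≤ (lo + hi) / 2 := by
          rcases Nat.lt_or_ge ((lo + hi) / 2) (pvFi bl s) with hlt | hge
          · exact absurd (pvFi_lt bl s _ hlt) hm
          · exact hge
        exact ih lo ((lo + hi) / 2) h1 hle (by omega) (by omega)

lemma pvFi_mono (bl : List (Int × Int)) (s s' : Int) (h : s ≤ s') : pvFi bl s ≤ pvFi bl s' := by
  induction bl with
  | nil => simp [pvFi]
  | cons p t ih => simp only [pvFi]; split <;> split <;> omega

lemma pvAppendTwoIfs {α : Type} (keep : List α) (c1 c2 : Prop) [Decidable c1] [Decidable c2] (x y : α) :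
    (if c2 then (if c1 then keep ++ [x] else keep) ++ [y] else if c1 then keep ++ [x] else keep)
      = keep ++ ((if c1 then [x] else []) ++ (if c2 then [y] else [])) := by
  split <;> split <;> simp

-- one A-step equals appending B's flanks, and leaves the pointer at pvFi
lemma pvStep_eq (bl : List (Int × Int)) (n dist : Int)
    (hs : ∀ i j, i ≤ j → j < bl.length → (bl.getD i (0, 0)).2 ≤ (bl.getD j (0, 0)).2)
    (keep : List (Int × Int)) (b : Nat) (fe : Int × Int) (hb : b ≤ pvFi bl fe.1) :
    pvAStep bl n dist (keep, b) fe
      = (keep ++ pvFlanks (bl.map Prod.fst) (bl.map Prod.snd) bl.length n dist fe, pvFi bl fe.1) := by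
  unfold pvAStep pvFlanks
  simp only [pvAdvance_eq bl fe.1 bl.length b hb
      (le_trans (pvFi_le_length bl fe.1) (Nat.le_add_left _ _)),
    pvFirstGt_eq bl fe.1 hs bl.length 0 bl.length (Nat.zero_le _) (pvFi_le_length bl fe.1) le_rfl
      (by omega),
    getD_map_snd, getD_map_fst, ite_self]
  rw [pvAppendTwoIfs]

lemma pvMain (bl : List (Int × Int)) (n dist : Int)
    (hs : ∀ i j, i ≤ j → j < bl.length → (bl.getD i (0, 0)).2 ≤ (bl.getD j (0, 0)).2) :
    ∀ (feats keep : List (Int × Int)) (b : Nat), pvStartsMono feats = true →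
      (∀ q r, feats = q :: r → b ≤ pvFi bl q.1) →
      (feats.foldl (pvAStep bl n dist) (keep, b)).1
        = keep ++ feats.flatMap (pvFlanks (bl.map Prod.fst) (bl.map Prod.snd) bl.length n dist) := by
  intro feats
  induction feats with
  | nil => intro keep b _ _; simp
  | cons fe rest ih =>
    intro keep b hok hb
    obtain ⟨hrest, hsep⟩ := pvStartsMono_cons fe rest hok
    have hbfe : b ≤ pvFi bl fe.1 := hb fe rest rfl
    rw [List.foldl_cons, pvStep_eq bl n dist hs keep b fe hbfe,
        ih (keep ++ pvFlanks (bl.map Prod.fst) (bl.map Prod.snd) bl.length n dist fe) (pvFi bl fe.1) hrest ?_]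
    · simp [List.flatMap_cons, List.append_assoc]
    · rintro q r rfl
      exact pvFi_mono bl fe.1 q.1 (hsep q r rfl)

-- A's fold-merge and B's group-absorbing merge agree on every (sorted or not) list
lemma pvMergeFold_shift (t : List (Int × Int)) (a l : List (Int × Int)) (x : Int × Int) :
    t.foldl pvMergeFold (a ++ l, x)
      = ((a ++ (t.foldl pvMergeFold (l, x)).1), (t.foldl pvMergeFold (l, x)).2) := by
  induction t generalizing l x with
  | nil => simp
  | cons p t ih =>
    by_cases hp : p.1 ≤ x.2
    · simp only [List.foldl_cons, pvMergeFold, if_pos hp]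
      exact ih l _
    · simp only [List.foldl_cons, pvMergeFold, if_neg hp]
      rw [show a ++ l ++ [x] = a ++ (l ++ [x]) by simp, ih (l ++ [x]) p]

lemma pvMS_nil (f : Nat) : pvMergeSorted f [] = [] := by cases f <;> rfl

lemma pvAbsorb_len (t : List (Int × Int)) (e : Int) : (pvAbsorb e t).2.length ≤ t.length := by
  induction t generalizing e with
  | nil => simp [pvAbsorb]
  | cons p t ih =>
    by_cases hp : p.1 ≤ e
    · simp only [pvAbsorb, if_pos hp, List.length_cons]
      exact le_trans (ih _) (Nat.le_succ _)
    · simp [pvAbsorb, hp]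

lemma pvMS_fuel (f : Nat) : ∀ l : List (Int × Int), l.length ≤ f →
    pvMergeSorted (f + 1) l = pvMergeSorted f l := by
  induction f with
  | zero => intro l hl; rw [List.length_eq_zero_iff.mp (Nat.le_zero.mp hl)]; rfl
  | succ f ih =>
    intro l hl
    cases l with
    | nil => rfl
    | cons se t =>
      show (se.1, (pvAbsorb se.2 t).1) :: pvMergeSorted (f + 1) (pvAbsorb se.2 t).2
          = (se.1, (pvAbsorb se.2 t).1) :: pvMergeSorted f (pvAbsorb se.2 t).2
      rw [ih _ (le_trans (pvAbsorb_len t se.2) (by simpa using Nat.lt_succ_iff.mp (Nat.lt_of_lt_of_le (Nat.lt_succ_self _) hl)))]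

lemma pvRun_eq_mergeSorted (f : Nat) :
    ∀ (t : List (Int × Int)) (x : Int × Int), t.length ≤ f →
      (t.foldl pvMergeFold ([], x)).1 ++ [(t.foldl pvMergeFold ([], x)).2]
        = pvMergeSorted (f + 1) (x :: t) := by
  induction f with
  | zero =>
    intro t x ht
    rw [List.length_eq_zero_iff.mp (Nat.le_zero.mp ht)]
    simp [pvMergeSorted, pvAbsorb, pvMS_nil]
  | succ f ih =>
    intro t x ht
    cases t with
    | nil => simp [pvMergeSorted, pvAbsorb]
    | cons p t =>
      by_cases hp : p.1 ≤ x.2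
      · have habs : pvAbsorb x.2 (p :: t) = pvAbsorb (max x.2 p.2) t := by
          simp [pvAbsorb, hp]
        have ht' : t.length ≤ f := by simpa using ht
        calc (List.foldl pvMergeFold ([], x) (p :: t)).1 ++ [(List.foldl pvMergeFold ([], x) (p :: t)).2]
            = (t.foldl pvMergeFold ([], (x.1, max x.2 p.2))).1
                ++ [(t.foldl pvMergeFold ([], (x.1, max x.2 p.2))).2] := by
              simp [pvMergeFold, hp]
          _ = pvMergeSorted (f + 1) ((x.1, max x.2 p.2) :: t) := ih t (x.1, max x.2 p.2) ht'
          _ = pvMergeSorted (f + 1 + 1) (x :: p :: t) := by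
              show (x.1, (pvAbsorb (max x.2 p.2) t).1) :: pvMergeSorted f (pvAbsorb (max x.2 p.2) t).2
                  = (x.1, (pvAbsorb x.2 (p :: t)).1) :: pvMergeSorted (f + 1) (pvAbsorb x.2 (p :: t)).2
              rw [habs, pvMS_fuel f _ (le_trans (pvAbsorb_len t (max x.2 p.2)) ht')]
      · have hstep : List.foldl pvMergeFold ([], x) (p :: t) = t.foldl pvMergeFold ([x], p) := by
          simp [pvMergeFold, hp]
        have hshift := pvMergeFold_shift t [x] [] p
        simp only [List.append_nil] at hshift
        rw [hstep, hshift]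
        simp only [List.cons_append, List.nil_append]
        rw [ih t p (by simpa using ht)]
        show (x.1, x.2) :: pvMergeSorted (f + 1) (p :: t)
            = (x.1, (pvAbsorb x.2 (p :: t)).1) :: pvMergeSorted (f + 1) (pvAbsorb x.2 (p :: t)).2
        simp [pvAbsorb, hp]

lemma merge_intervals_eq (xs : List (Int × Int)) :
    merge_intervals xs
      = pvMergeSorted (PySem.List.sorted2 xs Prod.fst Prod.snd).length
          (PySem.List.sorted2 xs Prod.fst Prod.snd) := by
  unfold merge_intervals
  cases h : PySem.List.sorted2 xs Prod.fst Prod.snd with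
  | nil => rfl
  | cons x rest => exact pvRun_eq_mergeSorted rest.length rest x le_rfl

-- ===== VERDICT (by name: the statement is the Claim_ definition above) =====
theorem build_keep_flanks_truncated_spec : Claim_equal_build_keep_flanks_truncated := by
  intro feats blockers n dist _ hpre
  unfold Spec_build_keep_flanks_truncated build_keep_flanks_truncated build_keep_flanks_truncated_alt
  by_cases hg : dist ≤ 0 ∨ feats = []
  · simp [hg]
  · simp only [if_neg hg]
    rcases hpre with hpre | ⟨hfm, hbm⟩
    · exact absurd hpre hg
    rw [pvMain _ n dist (pvEndsMono_ends _ hbm) feats [] 0 hfm (fun _ _ _ => Nat.zero_le _),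
        merge_intervals_eq]
    simp
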